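-- pv_equiv track=rewrite | github.com/linsalrob/PhiSpy | scripts/kmers_from_cds.py | kmerize_orf
-- ===== SOURCE A (Python) =====
-- def kmerize_orf(orf, k, t):
--
--     kmers = []
--     if t == 'simple':
--         stop = len(orf) - (len(orf) % k)
--         for i in range(0, stop, k):
--             kmers.append(orf[i : i + k])
--     elif t == 'all':
--         for j in range(0, k):
--             stop = len(orf) - ((len(orf) - j) % k)
--             for i in range(j, stop, k):
--                 kmers.append(orf[i : i + k])
--     elif t == 'codon':
--         for j in range(0, k, 3):
--             stop = len(orf) - ((len(orf) - j) % k)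
--             for i in range(j, stop, k):
--                 kmers.append(orf[i : i + k])
--
--     return set(kmers)
-- ===== SOURCE B (Python) =====
-- def kmerize_orf(orf, k, t):
--     steps = {'simple': k, 'all': 1, 'codon': 3}
--     if t not in steps or k <= 0:
--         return set()
--     n = len(orf)
--     windows = [orf[i : i + k] for i in range(n - k + 1)]
--     out = []
--     for j in range(0, k, steps[t]):
--         out.extend(windows[j::k])
--     return set(out)
-- ===== Notes on version B (the rewrite author's own statement) =====
-- stated objective: alternative
-- what changed: A appends orf[i:i+k] inside per-mode nested offset/stride index loops; B builds the sliding-window list once and concatenates the strided slices windows[j::k] for the mode's offsets, with an explicit guard returning set() for k <= 0.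
-- outside the precondition, e.g. on kmerize_orf('ACGT', 0, 'simple'): A raises ZeroDivisionError, B returns set()
import Mathlib
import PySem

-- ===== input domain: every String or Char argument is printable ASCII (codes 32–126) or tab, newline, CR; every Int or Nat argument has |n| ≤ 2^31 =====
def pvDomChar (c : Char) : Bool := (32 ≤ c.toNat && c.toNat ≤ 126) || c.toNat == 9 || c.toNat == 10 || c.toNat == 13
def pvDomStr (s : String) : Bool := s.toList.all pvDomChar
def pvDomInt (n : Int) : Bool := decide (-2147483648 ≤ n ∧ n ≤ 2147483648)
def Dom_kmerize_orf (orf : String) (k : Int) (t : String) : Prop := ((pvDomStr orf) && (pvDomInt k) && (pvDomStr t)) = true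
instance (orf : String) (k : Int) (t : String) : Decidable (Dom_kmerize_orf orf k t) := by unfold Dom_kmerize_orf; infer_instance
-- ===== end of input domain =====

-- B replaces A's per-offset nested character-index loops by one sliding-window pass plus strided
-- slices windows[j::k] (objective: alternative decomposition, same asymptotic cost).

-- ===== PORT A =====
def kmerize_orf (orf : String) (k : Int) (t : String) : List String :=
  let kmers : List String := []
  let kmers :=
    if t == "simple" then
      -- Python's 'len(orf) % k' raises ZeroDivisionError when k = 0: Pre_ excludes t = "simple" ∧ k = 0
      let stop := PySem.Str.len orf - PySem.Int.mod (PySem.Str.len orf) k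
      (PySem.List.pyRange 0 stop k).foldl
        (fun kmers i => kmers ++ [PySem.Str.slice orf (some i) (some (i + k))]) kmers
    else if t == "all" then
      (PySem.List.pyRange 0 k 1).foldl
        (fun kmers j =>
          let stop := PySem.Str.len orf - PySem.Int.mod (PySem.Str.len orf - j) k
          (PySem.List.pyRange j stop k).foldl
            (fun kmers i => kmers ++ [PySem.Str.slice orf (some i) (some (i + k))]) kmers) kmers
    else if t == "codon" then
      (PySem.List.pyRange 0 k 3).foldl
        (fun kmers j =>
          let stop := PySem.Str.len orf - PySem.Int.mod (PySem.Str.len orf - j) k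
          (PySem.List.pyRange j stop k).foldl
            (fun kmers i => kmers ++ [PySem.Str.slice orf (some i) (some (i + k))]) kmers) kmers
    else kmers
  PySem.Set.ofList kmers

-- ===== PORT B =====
def kmerize_orf_alt (orf : String) (k : Int) (t : String) : List String :=
  let steps : PySem.Dict String Int := PySem.Dict.ofList [("simple", k), ("all", 1), ("codon", 3)]
  match steps.get? t with
  | none => PySem.Set.ofList []
  | some step =>
    if k ≤ 0 then PySem.Set.ofList []
    else
      let n := PySem.Str.len orf
      let windows := (PySem.List.pyRange 0 (n - k + 1) 1).map
        (fun i => PySem.Str.slice orf (some i) (some (i + k)))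
      let out := (PySem.List.pyRange 0 k step).foldl
        (fun out j => out ++ (PySem.List.slice? windows (some j) none k).getD []) []
      PySem.Set.ofList out

-- ===== PRECONDITION & SPEC =====
-- Pre_ excludes only t = "simple" with k = 0, where Python A raises ZeroDivisionError (len(orf) % 0);
-- B returns set() there. No other input is excluded.
def Pre_kmerize_orf (orf : String) (k : Int) (t : String) : Prop := ¬ (t = "simple" ∧ k = 0)
instance (orf : String) (k : Int) (t : String) : Decidable (Pre_kmerize_orf orf k t) := by
  unfold Pre_kmerize_orf; infer_instance
def pvWitness_kmerize_orf : String × Int × String := ("ACGTACG", 3, "all")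

def Spec_kmerize_orf (orf : String) (k : Int) (t : String) (out : List String) : Prop := out = kmerize_orf_alt orf k t
instance (orf : String) (k : Int) (t : String) (out : List String) : Decidable (Spec_kmerize_orf orf k t out) := by unfold Spec_kmerize_orf; infer_instance

-- ===== CLAIM (what is proved, stated in full; the proofs are below) =====
def Claim_equal_kmerize_orf : Prop := ∀ (orf : String) (k : Int) (t : String), Dom_kmerize_orf orf k t → Pre_kmerize_orf orf k t → Spec_kmerize_orf orf k t (kmerize_orf orf k t)

-- ===== LEMMAS AND PROOFS =====

-- strided slice windows[j::k] of the sliding-window list = A's stride-k index loop at offset j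
theorem pv_stride_eq {α : Type} (f : Int → α) (N K j : Nat) (hK : 0 < K) :
    (PySem.List.slice? ((PySem.List.pyRange 0 ((N:Int) - K + 1) 1).map f) (some (j:Int)) none (K:Int)).getD []
      = (PySem.List.pyRange (j:Int) ((N:Int) - PySem.Int.mod ((N:Int) - (j:Int)) (K:Int)) (K:Int)).map f := by
  have hKpos : (0:Int) < K := by exact_mod_cast hK
  have hKne : ((K:Int)) ≠ 0 := ne_of_gt hKpos
  have hmod := PySem.Int.mod_eq_emod_of_pos (a := (N:Int) - j) hKpos
  set m : Nat := N + 1 - K with hm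
  have hlen : ((PySem.List.pyRange 0 ((N:Int) - K + 1) 1).map f).length = m := by
    rw [List.length_map, PySem.List.length_pyRange_one]; omega
  rw [PySem.List.pyRange_of_pos _ _ hKpos, List.map_map]
  unfold PySem.List.slice? PySem.List.sliceIndices
  simp only [hlen, if_neg hKne, if_neg (not_lt.mpr (le_of_lt hKpos)),
    if_neg (not_lt.mpr (Int.natCast_nonneg j)), if_pos hKpos, Option.getD_some, hmod]
  set r : Int := ((N:Int) - j) % K with hr
  set q : Int := ((N:Int) - j) / K with hq
  have hr0 : 0 ≤ r := Int.emod_nonneg _ hKne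
  have hrK : r < K := Int.emod_lt_of_pos _ hKpos
  have hdiv : (K:Int) * q + r = (N:Int) - j := Int.mul_ediv_add_emod _ _
  by_cases hjm : j < m
  · -- offset j has at least one full window
    have hKN : K ≤ N + 1 := by omega
    have hmK : (m:Int) = (N:Int) + 1 - K := by simp [hm]; omega
    have hminj : min ((j:Int)) ((m:Int)) = (j:Int) :=
      min_eq_left (by exact_mod_cast le_of_lt hjm)
    have hjmI : ((j:Int)) < m := by exact_mod_cast hjm
    have hq1 : 1 ≤ q := by
      rw [hq, Int.le_ediv_iff_mul_le hKpos]; omega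
    have hcB : (((m:Int) - min ((j:Int)) ((m:Int)) + K - 1) / K).toNat = q.toNat := by
      rw [hminj]
      congr 1
      rw [hq]
      congr 1
      omega
    have hcA : (((N:Int) - r - j + K - 1) / K).toNat = q.toNat := by
      congr 1
      have h1 : (N:Int) - r - j + K - 1 = (K - 1) + q * K := by linear_combination -hdiv
      rw [h1, Int.add_mul_ediv_right _ _ hKne,
        Int.ediv_eq_zero_of_lt (by omega) (by omega), zero_add]
    have hjstop : ((j:Int)) < (N:Int) - r := by nlinarith
    rw [if_pos (by rw [hminj]; exact hjmI), if_pos hjstop, hcA, hcB, hminj]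
    have hmem : ∀ x ∈ List.range q.toNat,
        ((PySem.List.pyRange 0 ((N:Int) - K + 1) 1).map f)[((j:Int) + K * x).toNat]?
          = some ((f ∘ fun x : Nat => (j:Int) + K * x) x) := by
      intro x hx
      have hxq : (x:Int) ≤ q - 1 := by
        have := List.mem_range.mp hx; omega
      have hidx : ((j:Int)) + K * x ≤ (N:Int) - K := by nlinarith
      have hidx0 : (0:Int) ≤ (j:Int) + K * x := by positivity
      have hidxm : ((j:Int) + K * x).toNat < m := by omega
      have hcast : ((N:Int) - K + 1) = ((m:Int)) := by omega
      rw [hcast, PySem.List.getElem?_map_pyRange_zero f m _ hidxm]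
      simp only [Function.comp_apply]
      congr 1
    rw [List.filterMap_congr hmem]
    simp
  · -- offset j past the last full window: both sides empty
    have hminj : min ((j:Int)) ((m:Int)) = (m:Int) :=
      min_eq_right (by exact_mod_cast le_of_not_gt hjm)
    have hstop : ¬ ((j:Int)) < (N:Int) - r := by
      by_cases hjN : ((j:Int)) ≤ (N:Int)
      · have hNjK : (N:Int) - j < K := by omega
        have : r = (N:Int) - j := by rw [hr, Int.emod_eq_of_lt (by omega) hNjK]
        omega
      · omega
    rw [if_neg (by rw [hminj]; exact lt_irrefl _), if_neg hstop]
    simp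

theorem pv_pyRange_nil_of_neg {a b s : Int} (hs : s < 0) (h : a ≤ b) :
    PySem.List.pyRange a b s = [] := by
  unfold PySem.List.pyRange
  rw [if_neg (ne_of_lt hs), if_neg (not_lt.mpr (le_of_lt hs)), if_neg (not_lt.mpr h)]
  simp

theorem pv_pyRange_nil_of_pos {a b s : Int} (hs : 0 < s) (h : b ≤ a) :
    PySem.List.pyRange a b s = [] := by
  rw [PySem.List.pyRange_of_pos _ _ hs, if_neg (not_lt.mpr h)]
  simp

theorem pv_pyRange_self (K : Nat) (hK : 0 < K) :
    PySem.List.pyRange 0 (K:Int) (K:Int) = [0] := by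
  have hKpos : (0:Int) < K := by exact_mod_cast hK
  rw [PySem.List.pyRange_of_pos _ _ hKpos, if_pos (by omega)]
  have h1 : ((K:Int) - 0 + K - 1) / K = 1 := by
    have h2 : ((K:Int) - 0 + K - 1) = (K - 1) + 1 * K := by ring
    rw [h2, Int.add_mul_ediv_right _ _ (ne_of_gt hKpos),
      Int.ediv_eq_zero_of_lt (by omega) (by omega)]
    omega
  rw [h1]
  simp

theorem pv_offsets_eq (orf : String) (K : Nat) (hK : 0 < K) (off : List Int)
    (hoff : ∀ j ∈ off, 0 ≤ j) (acc : List String) :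
    off.foldl (fun kmers j =>
        (PySem.List.pyRange j (PySem.Str.len orf - PySem.Int.mod (PySem.Str.len orf - j) (K:Int)) (K:Int)).foldl
          (fun kmers i => kmers ++ [PySem.Str.slice orf (some i) (some (i + K))]) kmers) acc
      = acc ++ off.flatMap (fun j =>
          (PySem.List.slice? ((PySem.List.pyRange 0 (PySem.Str.len orf - K + 1) 1).map
            (fun i => PySem.Str.slice orf (some i) (some (i + K)))) (some j) none (K:Int)).getD []) := by
  simp only [PySem.List.foldl_append_singleton_eq_map]
  rw [PySem.List.foldl_append_eq_flatMap]
  congr 1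
  apply List.flatMap_congr
  intro j hj
  obtain ⟨j', rfl⟩ : ∃ j' : Nat, (j':Int) = j := ⟨j.toNat, Int.toNat_of_nonneg (hoff j hj)⟩
  rw [PySem.Str.len_eq]
  exact (pv_stride_eq (fun i => PySem.Str.slice orf (some i) (some (i + K))) orf.toList.length K j' hK).symm

theorem pv_steps_simple (k : Int) :
    (PySem.Dict.ofList [("simple", k), ("all", (1:Int)), ("codon", 3)]).get? "simple" = some k := rfl

theorem pv_steps_all (k : Int) :
    (PySem.Dict.ofList [("simple", k), ("all", (1:Int)), ("codon", 3)]).get? "all" = some 1 := rfl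

theorem pv_steps_codon (k : Int) :
    (PySem.Dict.ofList [("simple", k), ("all", (1:Int)), ("codon", 3)]).get? "codon" = some 3 := rfl

theorem pv_steps_other (k : Int) (t : String) (h1 : t ≠ "simple") (h2 : t ≠ "all") (h3 : t ≠ "codon") :
    (PySem.Dict.ofList [("simple", k), ("all", (1:Int)), ("codon", 3)]).get? t = none := by
  have hmk : (PySem.Dict.ofList [("simple", k), ("all", (1:Int)), ("codon", 3)])
      = PySem.Dict.mk [("simple", k), ("all", 1), ("codon", 3)] := rfl
  rw [hmk]
  simp only [PySem.Dict.get?_mk_cons]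
  rw [if_neg (by simp [beq_iff_eq]; exact fun h => h1 h.symm),
    if_neg (by simp [beq_iff_eq]; exact fun h => h2 h.symm),
    if_neg (by simp [beq_iff_eq]; exact fun h => h3 h.symm)]
  rfl

theorem pv_simple_eq (orf : String) (K : Nat) (hK : 0 < K) :
    (PySem.List.pyRange 0 (PySem.Str.len orf - PySem.Int.mod (PySem.Str.len orf) (K:Int)) (K:Int)).foldl
        (fun kmers i => kmers ++ [PySem.Str.slice orf (some i) (some (i + K))]) []
      = (PySem.List.pyRange 0 (K:Int) (K:Int)).foldl
        (fun out j => out ++ (PySem.List.slice? ((PySem.List.pyRange 0 (PySem.Str.len orf - K + 1) 1).map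
            (fun i => PySem.Str.slice orf (some i) (some (i + K)))) (some j) none (K:Int)).getD []) [] := by
  rw [pv_pyRange_self K hK]
  have h0 := pv_offsets_eq orf K hK [0] (by simp) []
  simp only [List.foldl_cons, List.foldl_nil, List.flatMap_cons, List.flatMap_nil,
    List.append_nil, List.nil_append, sub_zero] at h0 ⊢
  exact h0

theorem pv_multi_eq (orf : String) (K : Nat) (hK : 0 < K) (s : Int) (hs : 0 < s) :
    (PySem.List.pyRange 0 (K:Int) s).foldl (fun kmers j =>
        (PySem.List.pyRange j (PySem.Str.len orf - PySem.Int.mod (PySem.Str.len orf - j) (K:Int)) (K:Int)).foldl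
          (fun kmers i => kmers ++ [PySem.Str.slice orf (some i) (some (i + K))]) kmers) []
      = (PySem.List.pyRange 0 (K:Int) s).foldl
        (fun out j => out ++ (PySem.List.slice? ((PySem.List.pyRange 0 (PySem.Str.len orf - K + 1) 1).map
            (fun i => PySem.Str.slice orf (some i) (some (i + K)))) (some j) none (K:Int)).getD []) [] := by
  have hoff : ∀ j ∈ PySem.List.pyRange 0 (K:Int) s, 0 ≤ j := fun j hj =>
    ((PySem.List.mem_pyRange_iff_of_pos hs j).mp hj).1
  rw [pv_offsets_eq orf K hK _ hoff [], PySem.List.foldl_append_eq_flatMap]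

-- ===== VERDICT =====
theorem kmerize_orf_spec : Claim_equal_kmerize_orf := by
  intro orf k t _ hpre
  unfold Spec_kmerize_orf kmerize_orf kmerize_orf_alt
  simp only [beq_iff_eq]
  have hlen0 : (0:Int) ≤ PySem.Str.len orf := by rw [PySem.Str.len_eq]; positivity
  by_cases ht1 : t = "simple"
  · subst ht1
    rw [pv_steps_simple, if_pos rfl]
    dsimp only
    by_cases hk : 0 < k
    · obtain ⟨K, rfl⟩ : ∃ K : Nat, (K:Int) = k := ⟨k.toNat, Int.toNat_of_nonneg (le_of_lt hk)⟩
      have hK : 0 < K := by exact_mod_cast hk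
      rw [if_neg (not_le.mpr hk)]
      exact congrArg PySem.Set.ofList (pv_simple_eq orf K hK)
    · have hkne : k ≠ 0 := fun h => hpre ⟨rfl, h⟩
      have hneg : k < 0 := by omega
      have hb := PySem.Int.mod_neg_bounds (PySem.Str.len orf) hneg
      rw [if_pos (by omega), pv_pyRange_nil_of_neg hneg (by omega)]
      rfl
  · rw [if_neg ht1]
    by_cases ht2 : t = "all"
    · subst ht2
      rw [pv_steps_all, if_pos rfl]
      dsimp only
      by_cases hk : 0 < k
      · obtain ⟨K, rfl⟩ : ∃ K : Nat, (K:Int) = k := ⟨k.toNat, Int.toNat_of_nonneg (le_of_lt hk)⟩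
        have hK : 0 < K := by exact_mod_cast hk
        rw [if_neg (not_le.mpr hk)]
        exact congrArg PySem.Set.ofList (pv_multi_eq orf K hK 1 one_pos)
      · rw [if_pos (by omega), PySem.List.pyRange_one_eq_nil (by omega)]
        rfl
    · rw [if_neg ht2]
      by_cases ht3 : t = "codon"
      · subst ht3
        rw [pv_steps_codon, if_pos rfl]
        dsimp only
        by_cases hk : 0 < k
        · obtain ⟨K, rfl⟩ : ∃ K : Nat, (K:Int) = k := ⟨k.toNat, Int.toNat_of_nonneg (le_of_lt hk)⟩
          have hK : 0 < K := by exact_mod_cast hk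
          rw [if_neg (not_le.mpr hk)]
          exact congrArg PySem.Set.ofList (pv_multi_eq orf K hK 3 (by norm_num))
        · rw [if_pos (by omega), pv_pyRange_nil_of_pos (by norm_num) (by omega)]
          rfl
      · rw [if_neg ht3, pv_steps_other k t ht1 ht2 ht3]
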